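-- pv_equiv track=rewrite | github.com/Artemigos/advent-of-code | python/2019/22/solution.py | compound_muls
-- ===== SOURCE A (Python) =====
-- def compound_muls(curr_mul, const_add, repetitions):
--     def compound_10(curr_mul, const_add):
--         repeating_mul = 1
--         repeating_add = 0
--         for _ in range(10):
--             repeating_mul *= curr_mul
--             repeating_add *= curr_mul
--             repeating_add += const_add
--
--             repeating_mul %= deck_size
--             repeating_add %= deck_size
--         return repeating_mul, repeating_add
--
--     muls = {1: (curr_mul, const_add)}
--     current_repeats = 1
--     while current_repeats < repetitions:
--         current_repeats *= 10
--         curr_mul, const_add = compound_10(curr_mul, const_add)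
--         muls[current_repeats] = curr_mul, const_add
--
--     known_muls = list(sorted(muls.keys(), reverse=True))
--     curr_mul = 1
--     const_add = 0
--
--     for m in known_muls:
--         mul, add = muls[m]
--         while m <= repetitions:
--             curr_mul *= mul
--             const_add *= mul
--             const_add += add
--
--             curr_mul %= deck_size
--             const_add %= deck_size
--
--             repetitions -= m
--
--     return curr_mul, const_add
--
-- deck_size = 119315717514047
-- ===== SOURCE B (Python) =====
-- deck_size = 119315717514047
--
--
-- def compound_muls(curr_mul, const_add, repetitions):
--     # Binary exponentiation of the affine map x -> mul*x + add (mod deck_size).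
--     res_mul, res_add = 1, 0
--     base_mul, base_add = curr_mul, const_add
--     e = repetitions
--     while e > 0:
--         if e % 2 == 1:
--             res_mul, res_add = res_mul * base_mul % deck_size, (res_add * base_mul + base_add) % deck_size
--         base_mul, base_add = base_mul * base_mul % deck_size, (base_add * base_mul + base_add) % deck_size
--         e //= 2
--     return res_mul, res_add
-- ===== Notes on version B (the rewrite author's own statement) =====
-- stated objective: idiomatic
-- what changed: Replaced A's dict of 10^k-fold affine maps plus a greedy base-10 digit-subtraction pass by standard binary exponentiation of the affine map modulo deck_size (accumulator composed with a squaring base, exponent halved each step).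
import Mathlib
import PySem

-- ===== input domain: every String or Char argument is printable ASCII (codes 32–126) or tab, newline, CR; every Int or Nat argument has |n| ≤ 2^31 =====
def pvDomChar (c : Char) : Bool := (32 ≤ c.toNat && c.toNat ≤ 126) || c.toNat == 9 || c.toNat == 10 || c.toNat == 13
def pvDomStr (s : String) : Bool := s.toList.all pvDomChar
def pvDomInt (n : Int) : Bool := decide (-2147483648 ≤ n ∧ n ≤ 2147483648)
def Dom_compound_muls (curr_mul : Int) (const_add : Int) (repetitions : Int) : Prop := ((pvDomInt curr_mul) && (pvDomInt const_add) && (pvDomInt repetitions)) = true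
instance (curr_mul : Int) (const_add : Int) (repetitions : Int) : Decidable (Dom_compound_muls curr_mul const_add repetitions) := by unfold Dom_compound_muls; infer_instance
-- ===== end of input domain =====

-- B replaces A's base-10 table of repeated affine maps by standard binary exponentiation
-- of the affine map (accumulator composed with a squaring base), same results (objective: idiomatic/alternative).

-- deck_size (module constant in both Pythons)
def pvDeck : Int := 119315717514047

-- ===== PORT A =====
-- helper compound_10: composes the affine map with itself 10 times, modding each step
def compound_10 (curr_mul : Int) (const_add : Int) : Int × Int :=
  (PySem.List.pyRange 0 10 1).foldl
    (fun (p : Int × Int) _ =>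
      (PySem.Int.mod (p.1 * curr_mul) pvDeck, PySem.Int.mod (p.2 * curr_mul + const_add) pvDeck))
    (1, 0)

-- first while loop: build the dict of 10^k-fold maps ('0 < current_repeats' is a pure
-- termination guard, always true on reachable states)
def pvLoop1 (curr_mul : Int) (const_add : Int) (current_repeats : Int) (repetitions : Int)
    (muls : PySem.Dict Int (Int × Int)) : PySem.Dict Int (Int × Int) :=
  if h : 0 < current_repeats ∧ current_repeats < repetitions then
    let cr := current_repeats * 10
    let p := compound_10 curr_mul const_add
    pvLoop1 p.1 p.2 cr repetitions (muls.insert cr p)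
  else muls
termination_by (repetitions - current_repeats).toNat
decreasing_by omega

-- inner 'while m <= repetitions' loop ('0 < m' is a pure termination guard, always true
-- on reachable states: every dict key is positive)
def pvInner (mul : Int) (add : Int) (m : Int) (acc : Int × Int) (rep : Int) : (Int × Int) × Int :=
  if h : 0 < m ∧ m ≤ rep then
    pvInner mul add m
      (PySem.Int.mod (acc.1 * mul) pvDeck, PySem.Int.mod (acc.2 * mul + add) pvDeck)
      (rep - m)
  else (acc, rep)
termination_by rep.toNat
decreasing_by omega

def compound_muls (curr_mul : Int) (const_add : Int) (repetitions : Int) : Int × Int :=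
  let muls : PySem.Dict Int (Int × Int) := (PySem.Dict.empty).insert 1 (curr_mul, const_add)
  let muls := pvLoop1 curr_mul const_add 1 repetitions muls
  let known_muls := PySem.List.sorted (muls.keys) (fun x => x) true
  let st := known_muls.foldl
    (fun (st : (Int × Int) × Int) m =>
      -- muls[m]: the key is always present, so the KeyError branch is unreachable
      let p := (muls.get? m).getD (0, 0)
      pvInner p.1 p.2 m st.1 st.2)
    ((1, 0), repetitions)
  st.1

-- ===== PORT B =====
-- binary-exponentiation loop of Source B: result composed with base when the bit is set, base squared
def pvBexp (res_mul : Int) (res_add : Int) (base_mul : Int) (base_add : Int) (e : Int) : Int × Int :=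
  if h : 0 < e then
    let r : Int × Int :=
      if PySem.Int.mod e 2 = 1 then
        (PySem.Int.mod (res_mul * base_mul) pvDeck, PySem.Int.mod (res_add * base_mul + base_add) pvDeck)
      else (res_mul, res_add)
    pvBexp r.1 r.2
      (PySem.Int.mod (base_mul * base_mul) pvDeck)
      (PySem.Int.mod (base_add * base_mul + base_add) pvDeck)
      (PySem.Int.floordiv e 2)
  else (res_mul, res_add)
termination_by e.toNat
decreasing_by
  rw [PySem.Int.floordiv_eq_ediv_of_pos (by norm_num)]
  omega

def compound_muls_alt (curr_mul : Int) (const_add : Int) (repetitions : Int) : Int × Int :=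
  pvBexp 1 0 curr_mul const_add repetitions

-- ===== PRECONDITION & SPEC =====
def Spec_compound_muls (curr_mul : Int) (const_add : Int) (repetitions : Int) (out : Int × Int) : Prop := out = compound_muls_alt curr_mul const_add repetitions
instance (curr_mul : Int) (const_add : Int) (repetitions : Int) (out : Int × Int) : Decidable (Spec_compound_muls curr_mul const_add repetitions out) := by unfold Spec_compound_muls; infer_instance

-- ===== CLAIM (what is proved, stated in full; the proofs are below) =====
def Claim_equal_compound_muls : Prop := ∀ (curr_mul : Int) (const_add : Int) (repetitions : Int), Dom_compound_muls curr_mul const_add repetitions → Spec_compound_muls curr_mul const_add repetitions (compound_muls curr_mul const_add repetitions)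

-- ===== LEMMAS AND PROOFS =====

-- canonical representative mod deck_size
def pvRed (p : Int × Int) : Int × Int := (p.1 % pvDeck, p.2 % pvDeck)

-- exact (un-modded) composition of affine maps: (pc x y) is "apply x, then y"
def pvPc (x y : Int × Int) : Int × Int := (x.1 * y.1, x.2 * y.1 + y.2)

-- n-fold composition of g with itself
def pvPow (g : Int × Int) : Nat → Int × Int
  | 0 => (1, 0)
  | n + 1 => pvPc (pvPow g n) g

theorem pvPc_assoc (x y z : Int × Int) : pvPc (pvPc x y) z = pvPc x (pvPc y z) := by
  simp only [pvPc, Prod.mk.injEq]; constructor <;> ring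

theorem pvPc_one_left (y : Int × Int) : pvPc (1, 0) y = y := by
  simp [pvPc]

theorem pvPc_one_right (x : Int × Int) : pvPc x (1, 0) = x := by
  simp [pvPc]

theorem pvRed_red (p : Int × Int) : pvRed (pvRed p) = pvRed p := by
  simp [pvRed, Int.emod_emod_of_dvd _ dvd_rfl]

theorem pvRed_pc (x y : Int × Int) : pvRed (pvPc (pvRed x) (pvRed y)) = pvRed (pvPc x y) := by
  unfold pvRed pvPc
  simp only [Prod.mk.injEq]
  constructor
  · exact (Int.mul_emod x.1 y.1 pvDeck).symm
  · show (x.2 % pvDeck * (y.1 % pvDeck) + y.2 % pvDeck) % pvDeck = (x.2 * y.1 + y.2) % pvDeck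
    conv_rhs => rw [Int.add_emod, Int.mul_emod, ← Int.emod_emod_of_dvd y.2 (dvd_refl pvDeck)]
    rw [Int.add_emod]

theorem pvRed_pc_left {x x' : Int × Int} (y : Int × Int) (h : pvRed x = pvRed x') :
    pvRed (pvPc x y) = pvRed (pvPc x' y) := by
  rw [← pvRed_pc x y, h, pvRed_pc]

theorem pvRed_pc_right (x : Int × Int) {y y' : Int × Int} (h : pvRed y = pvRed y') :
    pvRed (pvPc x y) = pvRed (pvPc x y') := by
  rw [← pvRed_pc x y, h, pvRed_pc]

theorem pvPow_one (g : Int × Int) : pvPow g 1 = g := by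
  simp [pvPow, pvPc]

theorem pvPow_add (g : Int × Int) (s t : Nat) :
    pvPow g (s + t) = pvPc (pvPow g s) (pvPow g t) := by
  induction t with
  | zero => simp [pvPow, pvPc_one_right]
  | succ t ih => rw [← Nat.add_assoc]; simp [pvPow, ih, pvPc_assoc]

theorem pvPow_mul (g : Int × Int) (s t : Nat) :
    pvPow g (s * t) = pvPow (pvPow g s) t := by
  induction t with
  | zero => simp [pvPow]
  | succ t ih => rw [Nat.mul_succ, pvPow_add, ih]; rfl

theorem pvRed_pow_congr {x y : Int × Int} (h : pvRed x = pvRed y) (n : Nat) :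
    pvRed (pvPow x n) = pvRed (pvPow y n) := by
  induction n with
  | zero => rfl
  | succ n ih =>
      show pvRed (pvPc (pvPow x n) x) = pvRed (pvPc (pvPow y n) y)
      rw [← pvRed_pc (pvPow x n) x, ih, h, pvRed_pc]

theorem pvRed_one_zero : pvRed (1, 0) = (1, 0) := by decide

-- the mod-step of both Pythons is composition followed by reduction
theorem pvStep_eq (g p : Int × Int) :
    (PySem.Int.mod (p.1 * g.1) pvDeck, PySem.Int.mod (p.2 * g.1 + g.2) pvDeck) = pvRed (pvPc p g) := by
  rw [PySem.Int.mod_eq_emod_of_pos (by norm_num [pvDeck]), PySem.Int.mod_eq_emod_of_pos (by norm_num [pvDeck])]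
  rfl

theorem pvFoldl_step (g : Int × Int) (l : List Int) :
    ∀ p : Int × Int,
      l.foldl (fun (q : Int × Int) _ =>
          (PySem.Int.mod (q.1 * g.1) pvDeck, PySem.Int.mod (q.2 * g.1 + g.2) pvDeck)) (pvRed p)
        = pvRed (pvPc p (pvPow g l.length)) := by
  induction l with
  | nil => intro p; simp [pvPow, pvPc_one_right]
  | cons x t ih =>
      intro p
      show t.foldl _ (PySem.Int.mod ((pvRed p).1 * g.1) pvDeck, PySem.Int.mod ((pvRed p).2 * g.1 + g.2) pvDeck) = _
      rw [pvStep_eq g (pvRed p), ih (pvPc (pvRed p) g), pvPc_assoc]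
      have h1 : pvPc g (pvPow g t.length) = pvPow g (1 + t.length) := by
        rw [pvPow_add, pvPow_one]
      rw [h1, pvRed_pc_left _ (pvRed_red p), List.length_cons, Nat.add_comm]

theorem pvCompound_10_eq (m a : Int) : compound_10 m a = pvRed (pvPow (m, a) 10) := by
  have h := pvFoldl_step (m, a) (PySem.List.pyRange 0 10 1) (1, 0)
  rw [pvRed_one_zero, pvPc_one_left] at h
  have hl : (PySem.List.pyRange 0 10 1).length = 10 := by decide
  rw [hl] at h
  exact h

-- greedy remainder of the inner loop / of the whole digit pass
def pvGrem (m r : Int) : Int :=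
  if h : 0 < m ∧ m ≤ r then pvGrem m (r - m) else r
termination_by r.toNat
decreasing_by omega

def pvGrems : List Int → Int → Int
  | [], r => r
  | m :: t, r => pvGrems t (pvGrem m r)

theorem pvGrem_le (m r : Int) : pvGrem m r ≤ r := by
  fun_induction pvGrem m r <;> omega

theorem pvGrem_nonneg (m r : Int) (h : 0 ≤ r) : 0 ≤ pvGrem m r := by
  fun_induction pvGrem m r <;> omega

theorem pvGrem_one (r : Int) (h : 0 ≤ r) : pvGrem 1 r = 0 := by
  fun_induction pvGrem 1 r <;> omega

theorem pvGrems_le (l : List Int) (r : Int) : pvGrems l r ≤ r := by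
  induction l generalizing r with
  | nil => simp [pvGrems]
  | cons m t ih => exact le_trans (ih (pvGrem m r)) (pvGrem_le m r)

theorem pvGrems_zero (l : List Int) (h : ∀ m ∈ l, 0 < m) : pvGrems l 0 = 0 := by
  induction l with
  | nil => rfl
  | cons m t ih =>
      have hm : 0 < m := h m (List.mem_cons_self ..)
      have hng : ¬ (0 < m ∧ m ≤ 0) := by omega
      show pvGrems t (pvGrem m 0) = 0
      rw [pvGrem, dif_neg hng]
      exact ih (fun x hx => h x (List.mem_cons_of_mem _ hx))

theorem pvGrems_final (l : List Int) (r : Int) (hr : 0 ≤ r) (h1 : (1:Int) ∈ l)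
    (h : ∀ m ∈ l, 0 < m) : pvGrems l r = 0 := by
  induction l generalizing r with
  | nil => cases h1
  | cons m t ih =>
      have ht : ∀ x ∈ t, (0:Int) < x := fun x hx => h x (List.mem_cons_of_mem _ hx)
      show pvGrems t (pvGrem m r) = 0
      by_cases hm1 : m = 1
      · subst hm1
        rw [pvGrem_one r hr]
        exact pvGrems_zero t ht
      · have h1t : (1:Int) ∈ t := by
          rcases List.mem_cons.mp h1 with h' | h'
          · exact absurd h'.symm hm1
          · exact h'
        exact ih (pvGrem m r) (pvGrem_nonneg m r hr) h1t ht

theorem pvGrems_neg (l : List Int) (r : Int) (hr : r < 0) (h : ∀ m ∈ l, 0 < m) :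
    pvGrems l r = r := by
  induction l with
  | nil => rfl
  | cons m t ih =>
      have hm : 0 < m := h m (List.mem_cons_self ..)
      have hng : ¬ (0 < m ∧ m ≤ r) := by omega
      show pvGrems t (pvGrem m r) = r
      rw [pvGrem, dif_neg hng]
      exact ih (fun x hx => h x (List.mem_cons_of_mem _ hx))

theorem pvInner_eq (g : Int × Int) (m : Int) (g' : Int × Int)
    (hg : pvRed g' = pvRed (pvPow g m.toNat)) :
    ∀ (n : Nat) (r : Int), r.toNat = n → ∀ (p : Int × Int),
      pvInner g'.1 g'.2 m (pvRed p) r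
        = (pvRed (pvPc p (pvPow g (r - pvGrem m r).toNat)), pvGrem m r) := by
  intro n
  induction n using Nat.strong_induction_on with
  | _ n ih =>
    intro r hn p
    rw [pvInner]
    split_ifs with h
    · rw [pvStep_eq g' (pvRed p), pvRed_pc_left g' (pvRed_red p)]
      rw [ih (r - m).toNat (by omega) (r - m) rfl (pvPc p g')]
      have hgrem : pvGrem m r = pvGrem m (r - m) := by rw [pvGrem, dif_pos h]
      have hq : pvGrem m (r - m) ≤ r - m := pvGrem_le _ _
      have hk : (r - pvGrem m (r - m)).toNat = m.toNat + (r - m - pvGrem m (r - m)).toNat := by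
        omega
      have hy : pvRed (pvPc g' (pvPow g (r - m - pvGrem m (r - m)).toNat))
          = pvRed (pvPow g (r - pvGrem m (r - m)).toNat) := by
        rw [← pvRed_pc, hg, pvRed_pc, ← pvPow_add, ← hk]
      rw [pvPc_assoc, pvRed_pc_right _ hy, hgrem]
    · have hgrem : pvGrem m r = r := by rw [pvGrem, dif_neg h]
      rw [hgrem, Int.sub_self]
      simp [pvPow, pvPc_one_right]

theorem pvOuter_eq (g : Int × Int) (muls : PySem.Dict Int (Int × Int))
    (hd : ∀ k v, muls.get? k = some v → 0 < k ∧ pvRed v = pvRed (pvPow g k.toNat)) :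
    ∀ (l : List Int) (r : Int) (p : Int × Int), (∀ mm ∈ l, (muls.get? mm).isSome) →
      l.foldl
        (fun (st : (Int × Int) × Int) mm =>
          pvInner ((muls.get? mm).getD (0, 0)).1 ((muls.get? mm).getD (0, 0)).2 mm st.1 st.2)
        (pvRed p, r)
      = (pvRed (pvPc p (pvPow g (r - pvGrems l r).toNat)), pvGrems l r) := by
  intro l
  induction l with
  | nil =>
      intro r p _
      show (pvRed p, r) = (pvRed (pvPc p (pvPow g (r - r).toNat)), r)
      rw [Int.sub_self]
      simp [pvPow, pvPc_one_right]
  | cons mm t ih =>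
      intro r p hsome
      obtain ⟨v, hv⟩ := Option.isSome_iff_exists.mp (hsome mm (List.mem_cons_self ..))
      obtain ⟨hmm, hvred⟩ := hd mm v hv
      have hstep : ((muls.get? mm).getD (0, 0)) = v := by rw [hv]; rfl
      show List.foldl _ (pvInner ((muls.get? mm).getD (0, 0)).1 ((muls.get? mm).getD (0, 0)).2 mm (pvRed p) r) t = _
      rw [hstep, pvInner_eq g mm v hvred r.toNat r rfl p]
      rw [ih (pvGrem mm r) (pvPc p (pvPow g (r - pvGrem mm r).toNat))
        (fun x hx => hsome x (List.mem_cons_of_mem _ hx))]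
      have hle1 : pvGrem mm r ≤ r := pvGrem_le _ _
      have hle2 : pvGrems t (pvGrem mm r) ≤ pvGrem mm r := pvGrems_le _ _
      have hK : (r - pvGrems t (pvGrem mm r)).toNat
          = (r - pvGrem mm r).toNat + (pvGrem mm r - pvGrems t (pvGrem mm r)).toNat := by omega
      show _ = (pvRed (pvPc p (pvPow g (r - pvGrems t (pvGrem mm r)).toNat)), pvGrems t (pvGrem mm r))
      rw [pvPc_assoc, ← pvPow_add, ← hK]

theorem pvLoop1_inv (g : Int × Int) :
    ∀ (n : Nat) (m a cr rep : Int) (muls : PySem.Dict Int (Int × Int)),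
      (rep - cr).toNat = n → 0 < cr → pvRed (m, a) = pvRed (pvPow g cr.toNat) →
      (∀ k v, muls.get? k = some v → 0 < k ∧ pvRed v = pvRed (pvPow g k.toNat)) →
      (∀ k v, (pvLoop1 m a cr rep muls).get? k = some v → 0 < k ∧ pvRed v = pvRed (pvPow g k.toNat)) := by
  intro n
  induction n using Nat.strong_induction_on with
  | _ n ih =>
    intro m a cr rep muls hn hcr hma hd
    rw [pvLoop1]
    split_ifs with h
    · refine ih (rep - cr * 10).toNat (by omega) (compound_10 m a).1 (compound_10 m a).2
        (cr * 10) rep _ rfl (by omega) ?_ ?_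
      · have h10 : pvRed (compound_10 m a) = pvRed (pvPow g (cr * 10).toNat) := by
          rw [pvCompound_10_eq, pvRed_red]
          have hton : (cr * 10).toNat = cr.toNat * 10 := by omega
          rw [pvRed_pow_congr hma 10, ← pvPow_mul, hton]
        exact h10
      · intro k v hkv
        rw [PySem.Dict.get?_insert] at hkv
        split_ifs at hkv with hk
        · cases hkv
          subst hk
          refine ⟨by omega, ?_⟩
          have hton : (cr * 10).toNat = cr.toNat * 10 := by omega
          rw [pvCompound_10_eq, pvRed_red, pvRed_pow_congr hma 10, ← pvPow_mul, hton]
        · exact hd k v hkv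
    · exact hd

theorem pvLoop1_contains (m a cr rep : Int) (muls : PySem.Dict Int (Int × Int))
    (h : muls.contains 1 = true) : (pvLoop1 m a cr rep muls).contains 1 = true := by
  fun_induction pvLoop1 m a cr rep muls with
  | case1 =>
      rename_i ih
      apply ih
      simp_all [PySem.Dict.contains_insert]
  | case2 => exact h

theorem pvA_eq (m a r : Int) : compound_muls m a r = pvRed (pvPow (m, a) r.toNat) := by
  set g : Int × Int := (m, a) with hgdef
  set muls0 : PySem.Dict Int (Int × Int) := PySem.Dict.empty.insert 1 (m, a) with hm0
  have hd0 : ∀ k v, muls0.get? k = some v → 0 < k ∧ pvRed v = pvRed (pvPow g k.toNat) := by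
    intro k v hkv
    rw [hm0, PySem.Dict.get?_insert] at hkv
    split_ifs at hkv with hk
    · cases hkv
      subst hk
      refine ⟨by norm_num, ?_⟩
      rw [show ((1 : Int)).toNat = 1 from rfl, pvPow_one]
    · simp [PySem.Dict.get?_empty] at hkv
  set muls1 := pvLoop1 m a 1 r muls0 with hm1
  have hd1 : ∀ k v, muls1.get? k = some v → 0 < k ∧ pvRed v = pvRed (pvPow g k.toNat) := by
    rw [hm1]
    exact pvLoop1_inv g (r - 1).toNat m a 1 r muls0 rfl (by norm_num)
      (by rw [show ((1 : Int)).toNat = 1 from rfl, pvPow_one]) hd0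
  have hc1 : muls1.contains 1 = true := by
    rw [hm1]
    exact pvLoop1_contains m a 1 r muls0 (by rw [hm0]; exact PySem.Dict.contains_insert_self ..)
  set l := PySem.List.sorted muls1.keys (fun x => x) true with hl
  have hmem : ∀ x : Int, x ∈ l ↔ x ∈ muls1.keys := by
    intro x
    rw [hl]
    exact PySem.List.mem_sorted ..
  have hsome : ∀ mm ∈ l, (muls1.get? mm).isSome := by
    intro mm hmm
    have hc : muls1.contains mm = true := (PySem.Dict.contains_iff_mem_keys _ _).mpr ((hmem mm).mp hmm)
    rw [PySem.Dict.contains_eq_isSome_get?] at hc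
    exact hc
  have h1l : (1 : Int) ∈ l := (hmem 1).mpr ((PySem.Dict.contains_iff_mem_keys _ _).mp hc1)
  have hpos : ∀ mm ∈ l, (0 : Int) < mm := by
    intro mm hmm
    obtain ⟨v, hv⟩ := Option.isSome_iff_exists.mp (hsome mm hmm)
    exact (hd1 mm v hv).1
  have hout := pvOuter_eq g muls1 hd1 l r (1, 0) hsome
  rw [pvRed_one_zero, pvPc_one_left] at hout
  show (l.foldl
      (fun (st : (Int × Int) × Int) mm =>
        pvInner ((muls1.get? mm).getD (0, 0)).1 ((muls1.get? mm).getD (0, 0)).2 mm st.1 st.2)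
      ((1, 0), r)).1 = pvRed (pvPow g r.toNat)
  rw [hout]
  by_cases hr : 0 ≤ r
  · rw [pvGrems_final l r hr h1l hpos]
    norm_num
  · rw [pvGrems_neg l r (by omega) hpos]
    have h1 : (r - r).toNat = 0 := by omega
    have h2 : r.toNat = 0 := by omega
    rw [h1, h2]

theorem pvSq_pow (q : Int × Int) (k : Nat) :
    pvRed (pvPow (pvRed (pvPc q q)) k) = pvRed (pvPow q (2 * k)) := by
  rw [pvRed_pow_congr (pvRed_red (pvPc q q)) k]
  have h2 : pvPc q q = pvPow q 2 := by
    show pvPc q q = pvPc (pvPow q 1) q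
    rw [pvPow_one]
  rw [h2, ← pvPow_mul]

theorem pvBexp_eq :
    ∀ (n : Nat) (e : Int), e.toNat = n → ∀ (p q : Int × Int),
      pvBexp (pvRed p).1 (pvRed p).2 q.1 q.2 e = pvRed (pvPc p (pvPow q e.toNat)) := by
  intro n
  induction n using Nat.strong_induction_on with
  | _ n ih =>
    intro e hn p q
    rw [pvBexp]
    have hD : (0 : Int) < pvDeck := by norm_num [pvDeck]
    have hm2 : PySem.Int.mod e 2 = e % 2 := PySem.Int.mod_eq_emod_of_pos (by norm_num)
    have hd2 : PySem.Int.floordiv e 2 = e / 2 := PySem.Int.floordiv_eq_ediv_of_pos (by norm_num)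
    rw [hm2, hd2]
    split_ifs with h0 hpar
    · simp only [PySem.Int.mod_eq_emod_of_pos hD]
      have key := ih (e / 2).toNat (by omega) (e / 2) rfl (pvPc (pvRed p) q) (pvRed (pvPc q q))
      refine Eq.trans key ?_
      have hy : pvRed (pvPc q (pvPow (pvRed (pvPc q q)) (e / 2).toNat))
          = pvRed (pvPow q (1 + 2 * (e / 2).toNat)) := by
        rw [← pvRed_pc, pvSq_pow, pvRed_pc, pvPow_add, pvPow_one]
      have he : e.toNat = 1 + 2 * (e / 2).toNat := by omega
      rw [pvPc_assoc, pvRed_pc_right _ hy, pvRed_pc_left _ (pvRed_red p), he]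
    · simp only [PySem.Int.mod_eq_emod_of_pos hD]
      have key := ih (e / 2).toNat (by omega) (e / 2) rfl p (pvRed (pvPc q q))
      refine Eq.trans key ?_
      have he : e.toNat = 2 * (e / 2).toNat := by omega
      rw [pvRed_pc_right _ (pvSq_pow q ((e / 2).toNat)), he]
    · have he : e.toNat = 0 := by omega
      rw [he]
      simp [pvPow, pvPc_one_right]

theorem pvB_eq (m a r : Int) : compound_muls_alt m a r = pvRed (pvPow (m, a) r.toNat) := by
  have h := pvBexp_eq r.toNat r rfl (1, 0) (m, a)
  rw [pvRed_one_zero, pvPc_one_left] at h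
  exact h

-- ===== VERDICT (by name: the statement is the Claim_ definition above) =====
theorem compound_muls_spec : Claim_equal_compound_muls := by
  intro m a r _
  show compound_muls m a r = compound_muls_alt m a r
  rw [pvA_eq, pvB_eq]
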